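-- pv_equiv track=rewrite | github.com/chikoneuru/dataflower | functions/dag_loader.py | ready_tasks
-- ===== SOURCE A (Python) =====
-- from typing import Any, Dict, List, Optional, Tuple, Union
--
-- def ready_tasks(tasks: Dict[str, Dict[str, Any]], edges: List[Dict[str, Any]], completed: List[str]) -> List[str]:
--     """
--     Return tasks whose predecessors are all in 'completed'.
--     """
--     preds: Dict[str, List[str]] = {tid: [] for tid in tasks}
--     for e in edges:
--         src, dst = e.get("from"), e.get("to")
--         if src in tasks and dst in tasks:
--             preds[dst].append(src)
--
--     ready: List[str] = []
--     completed_set = set(completed)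
--     for tid in tasks:
--         if tid in completed_set:
--             continue
--         if all(p in completed_set for p in preds.get(tid, [])):
--             ready.append(tid)
--     return ready
-- ===== SOURCE B (Python) =====
-- def ready_tasks(tasks, edges, completed):
--     """
--     Return tasks whose predecessors are all in 'completed'.
--     Single pass over edges building a 'blocked' set instead of a predecessor map.
--     """
--     completed_set = set(completed)
--     blocked = set()
--     for e in edges:
--         src, dst = e.get("from"), e.get("to")
--         if src in tasks and dst in tasks and src not in completed_set:
--             blocked.add(dst)
--     return [tid for tid in tasks if tid not in completed_set and tid not in blocked]
-- ===== Notes on version B (the rewrite author's own statement) =====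
-- stated objective: simpler
-- what changed: Instead of building a predecessor adjacency map and scanning each task's predecessor list with all(), B's single edge pass directly decides readiness by collecting a 'blocked' set of destinations of edges whose source is not completed, then filters the task keys against it.
import Mathlib
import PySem

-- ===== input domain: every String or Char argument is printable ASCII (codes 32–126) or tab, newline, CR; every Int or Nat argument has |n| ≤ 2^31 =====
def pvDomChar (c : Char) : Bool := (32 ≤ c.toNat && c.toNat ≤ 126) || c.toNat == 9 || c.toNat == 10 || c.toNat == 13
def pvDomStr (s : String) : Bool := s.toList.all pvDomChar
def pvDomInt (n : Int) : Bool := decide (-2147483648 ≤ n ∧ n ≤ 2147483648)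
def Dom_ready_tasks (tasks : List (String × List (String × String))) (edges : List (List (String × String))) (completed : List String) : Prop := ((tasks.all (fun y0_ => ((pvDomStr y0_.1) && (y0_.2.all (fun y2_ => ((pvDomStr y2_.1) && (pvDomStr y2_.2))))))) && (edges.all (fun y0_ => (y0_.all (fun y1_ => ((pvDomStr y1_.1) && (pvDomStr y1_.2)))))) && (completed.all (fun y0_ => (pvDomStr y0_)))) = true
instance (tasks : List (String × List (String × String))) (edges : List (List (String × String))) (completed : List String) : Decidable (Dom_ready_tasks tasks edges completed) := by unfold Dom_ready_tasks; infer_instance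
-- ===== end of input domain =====

-- B replaces A's predecessor-adjacency map and per-task all() scan by one edge pass
-- that collects a 'blocked' set; objective: simpler. Return value only (no mutation).

-- ===== PORT A =====
-- A: build preds (dict key -> predecessor list), then keep uncompleted keys whose preds are all completed.
def ready_tasks (tasks : List (String × List (String × String))) (edges : List (List (String × String))) (completed : List String) : List String :=
  let tkeys := PySem.List.dedup (tasks.map Prod.fst)          -- keys of the tasks dict, insertion order
  let preds : PySem.Dict String (List String) :=
    tkeys.foldl (fun d tid => PySem.Dict.insert d tid []) PySem.Dict.empty
  let preds := edges.foldl (fun d e =>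
    match PySem.Dict.get? (PySem.Dict.ofList e) "from", PySem.Dict.get? (PySem.Dict.ofList e) "to" with
    | some src, some dst =>
        if (tasks.map Prod.fst).contains src && (tasks.map Prod.fst).contains dst then
          PySem.Dict.modify d dst [] (fun l => l ++ [src])    -- preds[dst].append(src); dst always present
        else d
    | _, _ => d) preds
  let completedSet := PySem.Set.ofList completed
  tkeys.foldl (fun ready tid =>
    if PySem.Set.contains completedSet tid then ready
    else if (PySem.Dict.getD preds tid []).all (fun p => PySem.Set.contains completedSet p) then ready ++ [tid]
    else ready) []

-- ===== PORT B =====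
-- B: one pass over edges builds the 'blocked' set; then filter the task keys.
def ready_tasks_alt (tasks : List (String × List (String × String))) (edges : List (List (String × String))) (completed : List String) : List String :=
  let tkeys := PySem.List.dedup (tasks.map Prod.fst)
  let completedSet := PySem.Set.ofList completed
  let blocked : PySem.Set String := edges.foldl (fun b e =>
    -- src/dst may be absent (Python None): then the membership test fails and b is kept
    (PySem.Dict.get? (PySem.Dict.ofList e) "from").elim b (fun src =>
      (PySem.Dict.get? (PySem.Dict.ofList e) "to").elim b (fun dst =>
        if (tasks.map Prod.fst).contains src && (tasks.map Prod.fst).contains dst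
            && !(PySem.Set.contains completedSet src) then
          PySem.Set.add b dst
        else b))) PySem.Set.empty
  tkeys.filter (fun tid => !(PySem.Set.contains completedSet tid) && !(PySem.Set.contains blocked tid))

-- ===== PRECONDITION & SPEC =====
def Spec_ready_tasks (tasks : List (String × List (String × String))) (edges : List (List (String × String))) (completed : List String) (out : List String) : Prop := out = ready_tasks_alt tasks edges completed
instance (tasks : List (String × List (String × String))) (edges : List (List (String × String))) (completed : List String) (out : List String) : Decidable (Spec_ready_tasks tasks edges completed out) := by unfold Spec_ready_tasks; infer_instance

-- ===== CLAIM (what is proved, stated in full; the proofs are below) =====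
def Claim_equal_ready_tasks : Prop := ∀ (tasks : List (String × List (String × String))) (edges : List (List (String × String))) (completed : List String), Dom_ready_tasks tasks edges completed → Spec_ready_tasks tasks edges completed (ready_tasks tasks edges completed)

-- ===== LEMMAS AND PROOFS =====

-- membership in a set after .add
lemma pv_contains_add (b : PySem.Set String) (x y : String) :
    PySem.Set.contains (PySem.Set.add b x) y = (PySem.Set.contains b y || y == x) := by
  simp only [PySem.Set.add, PySem.Set.contains]
  split
  · next h => by_cases hy : y = x <;> simp_all
  · by_cases hy : y = x <;> simp [hy]

-- the initial preds dict maps every key to []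
lemma pv_getD_init (l : List String) (d : PySem.Dict String (List String))
    (h : ∀ k, PySem.Dict.getD d k [] = []) :
    ∀ k, PySem.Dict.getD (l.foldl (fun d tid => PySem.Dict.insert d tid []) d) k [] = [] := by
  induction l generalizing d with
  | nil => simpa using h
  | cons x xs ih =>
      intro k
      refine ih _ (fun k => ?_) k
      rw [PySem.Dict.getD_insert]
      split <;> simp [h]

-- one edge step preserves: «all preds of tid completed» in A  =  «tid not blocked» in B
lemma pv_step (tmem : List String) (cset : PySem.Set String) (e : List (String × String))
    (d : PySem.Dict String (List String)) (b : PySem.Set String)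
    (h : ∀ tid, ((PySem.Dict.getD d tid []).all (fun p => PySem.Set.contains cset p)) = !(PySem.Set.contains b tid)) :
    ∀ tid,
      ((PySem.Dict.getD (match PySem.Dict.get? (PySem.Dict.ofList e) "from", PySem.Dict.get? (PySem.Dict.ofList e) "to" with
        | some src, some dst =>
            if tmem.contains src && tmem.contains dst then
              PySem.Dict.modify d dst [] (fun l => l ++ [src])
            else d
        | _, _ => d) tid []).all (fun p => PySem.Set.contains cset p))
      = !(PySem.Set.contains ((PySem.Dict.get? (PySem.Dict.ofList e) "from").elim b (fun src =>
          (PySem.Dict.get? (PySem.Dict.ofList e) "to").elim b (fun dst =>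
            if tmem.contains src && tmem.contains dst && !(PySem.Set.contains cset src) then
              PySem.Set.add b dst
            else b))) tid) := by
  intro tid
  cases hsrc : PySem.Dict.get? (PySem.Dict.ofList e) "from" with
  | none =>
      cases hdst : PySem.Dict.get? (PySem.Dict.ofList e) "to" <;> exact h tid
  | some src =>
      cases hdst : PySem.Dict.get? (PySem.Dict.ofList e) "to" with
      | none => exact h tid
      | some dst =>
          simp only [Option.elim_some]
          by_cases hs : tmem.contains src = true
          case neg =>
            rw [if_neg (fun hx => hs (by rw [Bool.and_eq_true] at hx; exact hx.1)),
              if_neg (fun hx => hs (by rw [Bool.and_eq_true, Bool.and_eq_true] at hx; exact hx.1.1))]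
            exact h tid
          case pos =>
          by_cases ht : tmem.contains dst = true
          case neg =>
            rw [if_neg (fun hx => ht (by rw [Bool.and_eq_true] at hx; exact hx.2)),
              if_neg (fun hx => ht (by rw [Bool.and_eq_true, Bool.and_eq_true] at hx; exact hx.1.2))]
            exact h tid
          case pos =>
          rw [if_pos (by rw [Bool.and_eq_true]; exact ⟨hs, ht⟩)]
          by_cases hc : PySem.Set.contains cset src = true
          case pos =>
            rw [if_neg (fun hx => by
              rw [Bool.and_eq_true] at hx
              have := hx.2
              rw [hc] at this
              exact absurd this (by decide)), PySem.Dict.getD_modify]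
            split
            · next heq =>
                subst heq
                simp only [List.all_append, List.all_cons, List.all_nil, hc, Bool.and_true]
                exact h tid
            · exact h tid
          case neg =>
            rw [if_pos (by
              rw [Bool.and_eq_true, Bool.and_eq_true, Bool.eq_false_iff.mpr hc]
              exact ⟨⟨hs, ht⟩, rfl⟩), PySem.Dict.getD_modify]
            split
            · next heq =>
                subst heq
                simp only [List.all_append, List.all_cons, List.all_nil,
                  Bool.eq_false_iff.mpr hc]
                rw [pv_contains_add]
                simp
            · next hne =>
                rw [pv_contains_add]
                have : (tid == dst) = false := by simp [hne]
                rw [this, Bool.or_false]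
                exact h tid

-- the invariant carried through both edge loops
lemma pv_inv (tmem : List String) (cset : PySem.Set String) :
    ∀ (edges : List (List (String × String))) (d : PySem.Dict String (List String)) (b : PySem.Set String),
    (∀ tid, ((PySem.Dict.getD d tid []).all (fun p => PySem.Set.contains cset p)) = !(PySem.Set.contains b tid)) →
    ∀ tid,
      ((PySem.Dict.getD (edges.foldl (fun d e =>
        match PySem.Dict.get? (PySem.Dict.ofList e) "from", PySem.Dict.get? (PySem.Dict.ofList e) "to" with
        | some src, some dst =>
            if tmem.contains src && tmem.contains dst then
              PySem.Dict.modify d dst [] (fun l => l ++ [src])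
            else d
        | _, _ => d) d) tid []).all (fun p => PySem.Set.contains cset p))
      = !(PySem.Set.contains (edges.foldl (fun b e =>
        (PySem.Dict.get? (PySem.Dict.ofList e) "from").elim b (fun src =>
          (PySem.Dict.get? (PySem.Dict.ofList e) "to").elim b (fun dst =>
            if tmem.contains src && tmem.contains dst && !(PySem.Set.contains cset src) then
              PySem.Set.add b dst
            else b))) b) tid) := by
  intro edges
  induction edges with
  | nil => intro d b h tid; exact h tid
  | cons e rest ih =>
      intro d b h tid
      simp only [List.foldl_cons]
      exact ih _ _ (pv_step tmem cset e d b h) tid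

-- ===== VERDICT (by name: the statement is the Claim_ definition above) =====
theorem ready_tasks_spec : Claim_equal_ready_tasks := by
  intro tasks edges completed _
  unfold Spec_ready_tasks ready_tasks ready_tasks_alt
  simp only []
  have hfun : (fun (ready : List String) (tid : String) =>
      if PySem.Set.contains (PySem.Set.ofList completed) tid then ready
      else if (PySem.Dict.getD (edges.foldl (fun d e =>
        match PySem.Dict.get? (PySem.Dict.ofList e) "from", PySem.Dict.get? (PySem.Dict.ofList e) "to" with
        | some src, some dst =>
            if (tasks.map Prod.fst).contains src && (tasks.map Prod.fst).contains dst then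
              PySem.Dict.modify d dst [] (fun l => l ++ [src])
            else d
        | _, _ => d) ((PySem.List.dedup (tasks.map Prod.fst)).foldl (fun d tid => PySem.Dict.insert d tid []) PySem.Dict.empty)) tid []).all
            (fun p => PySem.Set.contains (PySem.Set.ofList completed) p) then ready ++ [tid]
      else ready) = (fun ready tid =>
      if (!(PySem.Set.contains (PySem.Set.ofList completed) tid) &&
          !(PySem.Set.contains (edges.foldl (fun b e =>
        (PySem.Dict.get? (PySem.Dict.ofList e) "from").elim b (fun src =>
          (PySem.Dict.get? (PySem.Dict.ofList e) "to").elim b (fun dst =>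
            if (tasks.map Prod.fst).contains src && (tasks.map Prod.fst).contains dst
                && !(PySem.Set.contains (PySem.Set.ofList completed) src) then
              PySem.Set.add b dst
            else b))) PySem.Set.empty) tid)) then ready ++ [tid] else ready) := by
    funext ready tid
    have hinv := pv_inv (tasks.map Prod.fst) (PySem.Set.ofList completed) edges
      ((PySem.List.dedup (tasks.map Prod.fst)).foldl (fun d tid => PySem.Dict.insert d tid []) PySem.Dict.empty)
      PySem.Set.empty
      (fun tid => by
        rw [pv_getD_init _ _ (fun k => by simp [pysem]) tid]
        simp [PySem.Set.empty, PySem.Set.contains])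
      tid
    rw [hinv]
    by_cases hct : PySem.Set.contains (PySem.Set.ofList completed) tid = true
    · rw [hct]; simp
    · rw [Bool.eq_false_iff.mpr hct]; simp
  rw [hfun, PySem.List.foldl_append_if_eq_filter]
  simp
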